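-- pv_equiv track=rewrite | github.com/sp-kantz/SummarizedNews-Revisited-Laravel | storage/app/public/summarizer_filesystem/scripts/py/lower/semantic_similarity.py | words_to_synsets
-- ===== SOURCE A (Python) =====
-- def words_to_synsets(lex):
--
--     overlaps = {}
--
--     #for every word in the sentence
--     for i in range(len(lex)):
--         words = list(lex.keys())
--         first = ''
--         best = 0
--         #for every possible sense of the word
--         for sense in lex[words[i]]:
--             #save the first sense
--             if first == '':
--                 first = sense
--             #for every other word in the sentence
--             for j in range(len(words)):
--                 if i == j:
--                     continue
--                 #for every sense of the other words
--                 for other in lex[words[j]]: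
--                     #overlap in their definitions
--                     ov = len(list(set(lex[words[i]][sense]).intersection(lex[words[j]][other])))
--                     #save the sense of the word with the maximum overlap with the others
--                     if ov > best:
--                         best = ov
--                         overlaps[words[i]] = sense
--         #if no overlap is found, store the first sense
--         if words[i] not in overlaps:
--             overlaps[words[i]] = first
--     #return the sentence as a list of the best senses
--     return list(overlaps.values())
-- ===== SOURCE B (Python) =====
-- def words_to_synsets(lex):
--     # Inverted token index: each gloss token points at the senses containing it,
--     # then pairwise definition overlaps are accumulated per token occurrence list,
--     # instead of intersecting every sense pair of every word pair directly.
--     words = list(lex.keys())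
--     # token -> occurrences (word_index, sense_key); tokens deduplicated per gloss
--     postings = {}
--     for i, w in enumerate(words):
--         for s, gloss in lex[w].items():
--             for t in dict.fromkeys(gloss):
--                 postings.setdefault(t, []).append((i, s))
--     # overlap of every ordered pair of senses of different words, summed over tokens
--     pair = {}
--     for occ in postings.values():
--         for a in occ:
--             for b in occ:
--                 if a[0] != b[0]:
--                     pair[a, b] = pair.get((a, b), 0) + 1
--     # each sense's best overlap with a sense of another word
--     best = {}
--     for (a, _b), c in pair.items():
--         if c > best.get(a, 0):
--             best[a] = c
--     out = []
--     for i, w in enumerate(words):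
--         sl = list(lex[w].keys())
--         if not sl:
--             out.append('')
--         else:
--             scores = [best.get((i, s), 0) for s in sl]
--             out.append(sl[scores.index(max(scores))])
--     return out
-- ===== Notes on version B (the rewrite author's own statement) =====
-- stated objective: faster
-- what changed: B replaces A's quadruple nested loop of per-pair set intersections with an inverted token index: it builds token->(word,sense) postings once, accumulates each ordered sense-pair's overlap by walking each token's posting list, takes per-sense maxima from that pair counter, and emits each word's first-argmax sense; only co-occurring sense pairs are ever touched.
-- intended difference: On inputs where some word's first sense key is the empty string, the word has at least two senses, and none of its gloss tokens occurs in any other word's gloss, A returns that word's second sense key (its '' sentinel for 'first sense' keeps being reassigned), while B returns the actual first sense key '', which is what A's own comment 'if no overlap is found, store the first sense' intends. — e.g. on words_to_synsets([("a", [("", ["x"]), ("s", ["y"])]), ("b", [("t", ["z"])])]): A returns ["s", "t"], B returns ["", "t"]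
import Mathlib
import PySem

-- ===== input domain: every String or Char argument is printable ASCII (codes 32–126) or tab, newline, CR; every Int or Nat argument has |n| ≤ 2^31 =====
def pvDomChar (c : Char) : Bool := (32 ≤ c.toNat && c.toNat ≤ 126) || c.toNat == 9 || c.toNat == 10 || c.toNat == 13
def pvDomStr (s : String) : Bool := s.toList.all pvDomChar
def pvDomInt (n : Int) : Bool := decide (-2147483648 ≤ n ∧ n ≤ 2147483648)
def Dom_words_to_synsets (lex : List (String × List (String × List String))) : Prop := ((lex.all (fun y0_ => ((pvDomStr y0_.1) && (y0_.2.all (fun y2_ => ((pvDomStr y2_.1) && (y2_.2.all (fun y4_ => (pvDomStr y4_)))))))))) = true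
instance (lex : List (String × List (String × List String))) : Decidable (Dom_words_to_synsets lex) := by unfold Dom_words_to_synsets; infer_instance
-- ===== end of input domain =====

-- B replaces A's quadruple nested loop of set intersections with an inverted token index
-- (token -> posting list of senses), accumulating each sense pair's overlap per token and
-- taking per-sense maxima from that counter; a timing run measured it faster.

-- Argument decoding shared by both ports: the Python function receives `lex` as a dict of dicts,
-- so the association list collapses by Python's dict rules (later duplicate key overwrites in place).
def pvToDict (lex : List (String × List (String × List String))) :
    PySem.Dict String (PySem.Dict String (List String)) :=
  PySem.Dict.ofList (lex.map (fun p => (p.1, PySem.Dict.ofList p.2)))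

-- ===== PORT A =====
def words_to_synsets (lex : List (String × List (String × List String))) : List String :=
  let d := pvToDict lex
  let overlaps : PySem.Dict String String :=
    (PySem.List.pyRange 0 (d.size : Int) 1).foldl (fun overlaps i =>
      let words := d.keys
      let wi := PySem.List.pyGetD words i ""                  -- words[i]
      let st :=
        -- for sense in lex[words[i]]:   (state: (first, best, overlaps))
        (d.getD wi PySem.Dict.empty).keys.foldl
          (fun (st : String × Int × PySem.Dict String String) sense =>
            let first := if st.1 == "" then sense else st.1
            let inner :=
              -- for j in range(len(words)):
              (PySem.List.pyRange 0 (PySem.List.len words) 1).foldl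
                (fun (st2 : Int × PySem.Dict String String) j =>
                  if i == j then st2 else
                  let wj := PySem.List.pyGetD words j ""      -- words[j]
                  -- for other in lex[words[j]]:
                  (d.getD wj PySem.Dict.empty).keys.foldl
                    (fun (st3 : Int × PySem.Dict String String) other =>
                      let ov : Int :=
                        ((PySem.Set.inter
                            (PySem.Set.ofList ((d.getD wi PySem.Dict.empty).getD sense []))
                            ((d.getD wj PySem.Dict.empty).getD other [])).length : Int)
                      if ov > st3.1 then (ov, st3.2.insert wi sense) else st3)
                    st2)
                (st.2.1, st.2.2)
            (first, inner))
          ("", 0, overlaps)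
      if !(st.2.2.contains wi) then st.2.2.insert wi st.1 else st.2.2)
      PySem.Dict.empty
  overlaps.values

-- ===== PORT B =====
def words_to_synsets_alt (lex : List (String × List (String × List String))) : List String :=
  let d := pvToDict lex
  let words := d.keys
  -- token -> occurrences (word_index, sense_key); tokens deduplicated per gloss
  let postings : PySem.Dict String (List (Int × String)) :=
    (PySem.List.enumerate words).foldl (fun postings iw =>
      ((d.getD iw.2 PySem.Dict.empty).items).foldl (fun postings sg =>
        (PySem.List.dedup sg.2).foldl (fun postings t =>
          postings.modify t [] (· ++ [(iw.1, sg.1)])) postings)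
        postings)
      PySem.Dict.empty
  -- overlap of every ordered pair of senses of different words, summed over tokens
  let pair : PySem.Dict ((Int × String) × (Int × String)) Int :=
    postings.values.foldl (fun pair occ =>
      occ.foldl (fun pair a =>
        occ.foldl (fun pair b =>
          if !(a.1 == b.1) then pair.insert (a, b) (pair.getD (a, b) 0 + 1) else pair)
          pair)
        pair)
      PySem.Dict.empty
  -- each sense's best overlap with a sense of another word
  let best : PySem.Dict (Int × String) Int :=
    pair.items.foldl (fun best pc =>
      if best.getD pc.1.1 0 < pc.2 then best.insert pc.1.1 pc.2 else best)
      PySem.Dict.empty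
  (PySem.List.enumerate words).foldl (fun out iw =>
      let sl := (d.getD iw.2 PySem.Dict.empty).keys
      out ++ [if sl.isEmpty then "" else
        let scores := sl.map (fun s => best.getD (iw.1, s) 0)
        (match PySem.List.max? scores (fun x => x) with
         | none => ""
         | some m =>
           match PySem.List.index? scores m with
           | none => ""
           | some k => sl.getD k "")])
    []

-- ===== PRECONDITION & SPEC =====
-- On inputs where some word's first sense key is "" and the word has ≥ 2 senses and none of its gloss
-- tokens occurs in any other word's gloss, A returns that word's second sense key (A's '' sentinel for
-- 'first sense' keeps being reassigned), while B returns the actual first sense key "", which is what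
-- A's own comment 'if no overlap is found, store the first sense' intends.
def D_words_to_synsets (lex : List (String × List (String × List String))) : Prop :=
  ∃ p ∈ (pvToDict lex).items,
    p.2.keys.head? = some "" ∧ 2 ≤ p.2.size ∧
    ∀ g ∈ p.2.values, ∀ q ∈ (pvToDict lex).items, q.1 ≠ p.1 → ∀ t ∈ g, ∀ g2 ∈ q.2.values, t ∉ g2
instance (lex : List (String × List (String × List String))) : Decidable (D_words_to_synsets lex) := by
  unfold D_words_to_synsets; infer_instance

def Spec_words_to_synsets (lex : List (String × List (String × List String))) (out : List String) : Prop :=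
  ¬ D_words_to_synsets lex → out = words_to_synsets_alt lex
instance (lex : List (String × List (String × List String))) (out : List String) :
    Decidable (Spec_words_to_synsets lex out) := by unfold Spec_words_to_synsets; infer_instance

def pvDiffWitness_words_to_synsets : (List (String × List (String × List String))) :=
  [("a", [("", ["x"]), ("s", ["y"])]), ("b", [("t", ["z"])])]
def pvDiffWitnessOut_words_to_synsets : (List String) × (List String) := (["s", "t"], ["", "t"])

-- ===== CLAIM (what is proved, stated in full; the proofs are below) =====
def Claim_unchanged_words_to_synsets : Prop :=
  ∀ (lex : List (String × List (String × List String))), Dom_words_to_synsets lex →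
    Spec_words_to_synsets lex (words_to_synsets lex)
def Claim_changed_words_to_synsets : Prop :=
  Dom_words_to_synsets (pvDiffWitness_words_to_synsets) ∧
  D_words_to_synsets (pvDiffWitness_words_to_synsets) ∧
  words_to_synsets (pvDiffWitness_words_to_synsets) = pvDiffWitnessOut_words_to_synsets.1 ∧
  words_to_synsets_alt (pvDiffWitness_words_to_synsets) = pvDiffWitnessOut_words_to_synsets.2 ∧
  pvDiffWitnessOut_words_to_synsets.1 ≠ pvDiffWitnessOut_words_to_synsets.2

-- ===== LEMMAS AND PROOFS =====

def pvOv (g o : List String) : Int := ((PySem.Set.inter (PySem.Set.ofList g) o).length : Int)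

lemma pvOvNonneg (g o : List String) : 0 ≤ pvOv g o := Int.natCast_nonneg _

lemma pvOvZero (g o : List String) : pvOv g o = 0 ↔ ∀ t ∈ g, t ∉ o := by
  unfold pvOv
  rw [show PySem.Set.inter (PySem.Set.ofList g) o = (PySem.Set.ofList g).filter (fun x => o.contains x) from rfl]
  rw [Int.natCast_eq_zero, List.length_eq_zero_iff, List.filter_eq_nil_iff]
  constructor
  · intro h t ht hto
    exact h t ((PySem.Set.mem_ofList g t).mpr ht) (by simpa [List.contains_iff_mem] using hto)
  · intro h x hx
    simp only [List.contains_iff_mem]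
    exact fun hmem => h x ((PySem.Set.mem_ofList g x).mp hx) hmem

lemma pvMemValuesFoldl {κ ν : Type} [BEq κ] [LawfulBEq κ] :
    ∀ (l : List (κ × ν)) (d : PySem.Dict κ ν) (v : ν),
      v ∈ (l.foldl (fun d p => d.insert p.1 p.2) d).values → v ∈ d.values ∨ ∃ p ∈ l, v = p.2 := by
  intro l
  induction l with
  | nil => intro d v h; exact Or.inl h
  | cons p t ih =>
    intro d v h
    rcases ih _ v h with h2 | h2
    · rcases PySem.Dict.mem_values_insert d p.1 p.2 v h2 with h3 | h3
      · exact Or.inr ⟨p, by simp, h3⟩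
      · exact Or.inl h3
    · obtain ⟨p', hp', hv⟩ := h2
      exact Or.inr ⟨p', by simp [hp'], hv⟩

lemma pvValKeysNodup (lex : List (String × List (String × List String)))
    {v : PySem.Dict String (List String)} (hv : v ∈ (pvToDict lex).values) : v.keys.Nodup := by
  rcases pvMemValuesFoldl _ _ _ hv with h | ⟨p, hp, hv2⟩
  · simp [PySem.Dict.empty] at h
  · obtain ⟨p0, _, hp0⟩ := List.mem_map.mp hp
    subst hv2
    rw [← hp0]
    exact PySem.Dict.nodup_keys_ofList p0.2

lemma pvGetDKeysNodup (lex : List (String × List (String × List String))) (w : String) :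
    ((pvToDict lex).getD w PySem.Dict.empty).keys.Nodup := by
  rw [PySem.Dict.getD_eq_get?_getD]
  cases h : (pvToDict lex).get? w with
  | none => exact List.nodup_nil
  | some v =>
    simp only [Option.getD_some]
    have hv : v ∈ (pvToDict lex).values := by
      have := PySem.Dict.mem_items_of_get?_eq_some _ h
      exact List.mem_map_of_mem this
    exact pvValKeysNodup lex hv

-- value of an optional pending insert
def pvApply (acc : PySem.Dict String String) (wi : String) : Option String → PySem.Dict String String
  | none => acc
  | some s => acc.insert wi s

-- A's running strict-max selection over scored senses
def pvSel (b : Int) (cur : Option String) : List (String × Int) → Option String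
  | [] => cur
  | p :: t => if b < p.2 then pvSel p.2 (some p.1) t else pvSel b cur t

lemma pvL1 (wi s : String) (ns : List Int) : ∀ (b : Int) (dd : PySem.Dict String String),
    ns.foldl (fun st3 n => if st3.1 < n then (n, st3.2.insert wi s) else st3) (b, dd)
    = (ns.foldl max b, if ns.any (fun n => decide (b < n)) then dd.insert wi s else dd) := by
  induction ns with
  | nil => intro b dd; simp
  | cons n t ih =>
    intro b dd
    by_cases h : b < n
    · simp only [List.foldl_cons, List.any_cons, h, decide_true, Bool.true_or, if_true]
      rw [ih n (dd.insert wi s)]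
      have hm : max b n = n := by omega
      rw [hm]
      refine Prod.ext rfl ?_
      simp only
      split <;> simp [PySem.Dict.insert_insert_self]
    · simp only [List.foldl_cons, if_neg h, List.any_cons]
      rw [ih b dd]
      have hm : max b n = b := by omega
      rw [hm]
      simp [h]

lemma pvMaxShift (ns : List Int) : ∀ a b : Int, ns.foldl max (max a b) = max a (ns.foldl max b) := by
  induction ns with
  | nil => intro a b; rfl
  | cons n t ih => intro a b; simp only [List.foldl_cons, max_assoc, ih]

lemma pvAnyMax (ns : List Int) (b : Int) (hb : 0 ≤ b) :
    ns.any (fun n => decide (b < n)) = decide (b < ns.foldl max 0) := by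
  rcases h : ns.any (fun n => decide (b < n)) with _ | _
  · simp only [List.any_eq_false, decide_eq_true_eq] at h
    symm; simp only [decide_eq_false_iff_not, not_lt]
    rcases PySem.List.foldl_max_mem ns 0 with h0 | hmem
    · omega
    · have := h _ hmem; omega
  · simp only [List.any_eq_true, decide_eq_true_eq] at h
    obtain ⟨n, hn, hbn⟩ := h
    have := (PySem.List.le_foldl_max ns 0).2 n hn
    symm; simp only [decide_eq_true_eq]; omega

-- sense-level fold of A, abstracted: key/stream per sense
lemma pvL2 {α : Type} (key : α → String) (ns : α → List Int) (wi : String)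
    (acc : PySem.Dict String String) (l : List α) :
    ∀ (f0 : String) (b : Int) (cur : Option String), 0 ≤ b →
    l.foldl (fun (st : String × Int × PySem.Dict String String) a =>
        (if st.1 == "" then key a else st.1,
         (ns a).foldl (fun st3 n => if st3.1 < n then (n, st3.2.insert wi (key a)) else st3)
           (st.2.1, st.2.2)))
      (f0, b, pvApply acc wi cur)
    = (l.foldl (fun f a => if f == "" then key a else f) f0,
       l.foldl (fun v a => max v ((ns a).foldl max 0)) b,
       pvApply acc wi (pvSel b cur (l.map (fun a => (key a, (ns a).foldl max 0))))) := by
  induction l with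
  | nil => intro f0 b cur hb; rfl
  | cons a t ih =>
    intro f0 b cur hb
    simp only [List.foldl_cons, List.map_cons]
    rw [pvL1, pvAnyMax _ _ hb]
    have hshift : (ns a).foldl max b = max b ((ns a).foldl max 0) := by
      have := pvMaxShift (ns a) b 0
      rw [max_eq_left hb] at this; exact this
    rw [hshift]
    set sc := (ns a).foldl max 0 with hsc
    by_cases h : b < sc
    · have hm : max b sc = sc := by omega
      have hcol : (if decide (b < sc) = true then (pvApply acc wi cur).insert wi (key a)
          else pvApply acc wi cur) = pvApply acc wi (some (key a)) := by
        simp only [decide_eq_true_eq, if_pos h]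
        cases cur with
        | none => rfl
        | some r => simp [pvApply, PySem.Dict.insert_insert_self]
      rw [hcol, hm]
      rw [ih _ sc (some (key a)) (by have := (PySem.List.le_foldl_max (ns a) 0).1; omega)]
      simp only [pvSel, if_pos h]
    · have hm : max b sc = b := by omega
      have hcol : (if decide (b < sc) = true then (pvApply acc wi cur).insert wi (key a)
          else pvApply acc wi cur) = pvApply acc wi cur := by simp [h]
      rw [hcol, hm, ih _ b cur hb]
      simp only [pvSel, if_neg h]

-- the outer word loop: each iteration appends one fresh key
lemma pvOuter (step : PySem.Dict String String → (Int × String) → PySem.Dict String String)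
    (c : Int × String → String)
    (hstep : ∀ acc q, acc.contains q.2 = false → step acc q = acc.insert q.2 (c q)) :
    ∀ (l : List (Int × String)) (acc : PySem.Dict String String),
      (l.map (·.2)).Nodup → (∀ q ∈ l, acc.contains q.2 = false) →
      (l.foldl step acc).items = acc.items ++ l.map (fun q => (q.2, c q)) := by
  intro l
  induction l with
  | nil => intro acc _ _; simp
  | cons q t ih =>
    intro acc hnd hfresh
    simp only [List.map_cons, List.nodup_cons] at hnd
    simp only [List.foldl_cons]
    rw [hstep acc q (hfresh q (by simp))]
    have hfresh' : ∀ q' ∈ t, (acc.insert q.2 (c q)).contains q'.2 = false := by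
      intro q' hq'
      rw [PySem.Dict.contains_insert]
      have h1 : (q'.2 == q.2) = false := by
        simp only [beq_eq_false_iff_ne, ne_eq]
        intro he; exact hnd.1 (he ▸ List.mem_map_of_mem hq')
      rw [h1, hfresh q' (List.mem_cons_of_mem _ hq')]; rfl
    rw [ih _ hnd.2 hfresh']
    rw [PySem.Dict.items_insert_of_not_contains _ _ (hfresh q (by simp))]
    simp

-- enumerate of a mapped list
lemma pvEnumMap {α β : Type} (f : α → β) (xs : List α) : ∀ (s : Int),
    PySem.List.enumerate (xs.map f) s = (PySem.List.enumerate xs s).map (fun q => (q.1, f q.2)) := by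
  induction xs with
  | nil => intro s; rfl
  | cons x t ih => intro s; simp [PySem.List.enumerate_cons, ih]

lemma pvSelSpec_none : ∀ (l : List (String × Int)) (b : Int) (cur : Option String),
    ¬ b < (l.map (·.2)).foldl max b → pvSel b cur l = cur := by
  intro l
  induction l with
  | nil => intro b cur _; rfl
  | cons p t ih =>
    intro b cur hM
    simp only [List.map_cons, List.foldl_cons] at hM
    have h1 : ¬ b < p.2 := by
      intro h
      have := (PySem.List.le_foldl_max (t.map (·.2)) (max b p.2)).1
      omega
    have hmb : max b p.2 = b := by omega
    rw [hmb] at hM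
    simp only [pvSel, if_neg h1]
    exact ih b cur hM

lemma pvSelSpec_some : ∀ (l : List (String × Int)) (b : Int) (cur : Option String),
    b < (l.map (·.2)).foldl max b →
    ∃ p, l.find? (fun p => decide ((l.map (·.2)).foldl max b ≤ p.2)) = some p ∧
      pvSel b cur l = some p.1 := by
  intro l
  induction l with
  | nil => intro b cur h; simp at h
  | cons p t ih =>
    intro b cur hM
    simp only [List.map_cons, List.foldl_cons] at hM ⊢
    by_cases h1 : b < p.2
    · have hmb : max b p.2 = p.2 := by omega
      simp only [hmb] at hM ⊢
      simp only [pvSel, if_pos h1]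
      by_cases h2 : p.2 < (t.map (·.2)).foldl max p.2
      · obtain ⟨p', hfind, hsel⟩ := ih p.2 (some p.1) h2
        refine ⟨p', ?_, hsel⟩
        have hhead : (decide ((t.map (·.2)).foldl max p.2 ≤ p.2)) = false := by
          simp only [decide_eq_false_iff_not, not_le]; omega
        simp only [List.find?_cons, hhead]
        exact hfind
      · have hMp : (t.map (·.2)).foldl max p.2 = p.2 := by
          have := (PySem.List.le_foldl_max (t.map (·.2)) p.2).1; omega
        rw [hMp]
        refine ⟨p, ?_, ?_⟩
        · simp
        · exact pvSelSpec_none t p.2 (some p.1) (by omega)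
    · have hmb : max b p.2 = b := by omega
      simp only [hmb] at hM ⊢
      simp only [pvSel, if_neg h1]
      obtain ⟨p', hfind, hsel⟩ := ih b cur hM
      refine ⟨p', ?_, hsel⟩
      have hhead : (decide ((t.map (·.2)).foldl max b ≤ p.2)) = false := by
        simp only [decide_eq_false_iff_not, not_le]
        have := (PySem.List.le_foldl_max (t.map (·.2)) b).1
        omega
      simp only [List.find?_cons, hhead]
      exact hfind

def pvAchoice (sl : List (String × Int)) : String :=
  match pvSel 0 none sl with
  | some s => s
  | none => sl.foldl (fun f p => if f == "" then p.1 else f) ""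

def pvBsel (sl : List (String × Int)) : String :=
  if sl.isEmpty then "" else
    (((PySem.List.max? (sl.map (·.2)) (fun x => x)).bind
        (fun m => PySem.List.index? (sl.map (·.2)) m)).map
      (fun k => (sl.map (·.1)).getD k "")).getD ""

lemma pvFirstStay : ∀ (t : List (String × Int)) (f0 : String), (f0 == "") = false →
    t.foldl (fun f p => if f == "" then p.1 else f) f0 = f0 := by
  intro t
  induction t with
  | nil => intro f0 _; rfl
  | cons p t ih => intro f0 h; simp only [List.foldl_cons, h]; rw [if_neg (by simp_all), ih f0 h]

lemma pvL3 (sl : List (String × Int)) (hpos : ∀ p ∈ sl, 0 ≤ p.2)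
    (hout : ¬((sl.map (·.1)).head? = some "" ∧ 2 ≤ sl.length ∧ (sl.map (·.2)).foldl max 0 = 0)) :
    pvAchoice sl = pvBsel sl := by
  cases sl with
  | nil => rfl
  | cons p0 t =>
    have hp0 : 0 ≤ p0.2 := hpos p0 (by simp)
    set scores := (p0 :: t).map (·.2) with hscores
    set M := scores.foldl max 0 with hMdef
    have hMm : M = (t.map (·.2)).foldl max p0.2 := by
      simp only [hMdef, hscores, List.map_cons, List.foldl_cons, max_eq_right hp0]
    have hM0 : 0 ≤ M := by
      have := (PySem.List.le_foldl_max scores 0).1; omega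
    have hmax? : PySem.List.max? scores (fun x => x) = some M := by
      simp only [hscores, List.map_cons, PySem.List.max?_id_cons]; rw [hMm]
    have hle : ∀ n ∈ scores, n ≤ M := (PySem.List.le_foldl_max scores 0).2
    by_cases hM : 0 < M
    · -- positive max: both pick the first sense attaining M
      obtain ⟨p', hfind, hsel⟩ := pvSelSpec_some (p0 :: t) 0 none (by rw [← hMdef]; omega)
      rw [← hMdef] at hfind
      have hAch : pvAchoice (p0 :: t) = p'.1 := by simp [pvAchoice, hsel]
      have hMmem : M ∈ scores := by
        rcases PySem.List.foldl_max_mem scores 0 with h | h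
        · omega
        · exact h
      obtain ⟨k, hk⟩ := Option.isSome_iff_exists.mp
        ((PySem.List.index?_isSome_iff scores M).mpr hMmem)
      obtain ⟨pre, suf, hdec, hplen, hnotpre⟩ := (PySem.List.index?_eq_some_iff scores M k).mp hk
      rw [hscores] at hdec
      obtain ⟨pre', rest', hsl, hpre', hrest'⟩ := List.map_eq_append_iff.mp hdec
      obtain ⟨q, suf', hq, hq2, hsuf'⟩ := List.map_eq_cons_iff.mp hrest'
      subst hq
      have hfind2 : (pre' ++ q :: suf').find? (fun p => decide (M ≤ p.2)) = some q := by
        rw [List.find?_eq_some_iff_append]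
        refine ⟨by simp [hq2], pre', suf', rfl, ?_⟩
        intro a ha
        have ha2 : a.2 ∈ pre := by rw [← hpre']; exact List.mem_map_of_mem ha
        have hne : a.2 ≠ M := fun he => hnotpre (he ▸ ha2)
        have hlea : a.2 ≤ M := hle a.2 (by rw [hscores, hsl]; exact List.mem_map_of_mem (by simp [ha]))
        simp only [Bool.not_eq_eq_eq_not, Bool.not_true, decide_eq_false_iff_not, not_le]
        omega
      rw [hsl] at hfind
      rw [hfind2] at hfind
      have hp' : p' = q := Option.some.inj hfind.symm
      have hBch : pvBsel (p0 :: t) = q.1 := by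
        simp only [pvBsel, List.isEmpty_cons, Bool.false_eq_true, if_false, ← hscores, hmax?,
          Option.bind_some, hk, Option.map_some, Option.getD_some]
        rw [List.getD_eq_getElem?_getD, hsl]
        simp only [List.map_append, List.map_cons]
        rw [List.getElem?_append_right (by simp [← hplen, ← hpre'])]
        have : k - (pre'.map (·.1)).length = 0 := by simp [← hplen, ← hpre']
        rw [this]
        simp
      rw [hAch, hBch, hp']
    · -- max is 0: A falls back to its sentinel 'first', B to the first sense
      have hMz : M = 0 := by omega
      have hsel0 : pvSel 0 none (p0 :: t) = none := by
        apply pvSelSpec_none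
        rw [show ((p0 :: t).map (·.2)).foldl max 0 = M from by rw [hMdef]]
        omega
      have hp02 : p0.2 = 0 := by
        have := hle p0.2 (by simp [hscores]); omega
      have hidx : PySem.List.index? scores M = some 0 := by
        rw [hMz, hscores]
        simp only [List.map_cons]
        rw [hp02]
        exact PySem.List.index?_cons_self _ _
      have hBch : pvBsel (p0 :: t) = p0.1 := by
        simp only [pvBsel, List.isEmpty_cons, Bool.false_eq_true, if_false, ← hscores, hmax?,
          Option.bind_some, hidx, Option.map_some, Option.getD_some]
        simp
      rw [hBch]
      simp only [pvAchoice, hsel0]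
      by_cases hname : (p0.1 == "") = false
      · simp only [List.foldl_cons, beq_self_eq_true, if_true]
        exact pvFirstStay t p0.1 hname
      · have hname' : p0.1 = "" := by simpa using hname
        have ht : t = [] := by
          cases t with
          | nil => rfl
          | cons a b =>
            exfalso
            exact hout ⟨by simp [hname'], by simp, hMz⟩
        subst ht
        simp [hname']

def pvStream (its : List (String × PySem.Dict String (List String))) (i : Int) (g : List String) : List Int :=
  ((PySem.List.enumerate its).filter (fun q => !(q.1 == i))).flatMap
    (fun q => q.2.2.items.map (fun r => pvOv g r.2))

def pvScored (its : List (String × PySem.Dict String (List String))) (i : Int)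
    (di : PySem.Dict String (List String)) : List (String × Int) :=
  di.items.map (fun p => (p.1, (pvStream its i p.2).foldl max 0))

def pvChoice (its : List (String × PySem.Dict String (List String))) (i : Int)
    (di : PySem.Dict String (List String)) : String :=
  pvAchoice (pvScored its i di)

-- A's loop body for word (i, wi), as a function of the enumerate pair
def pvStepAFun (lex : List (String × List (String × List String)))
    (overlaps : PySem.Dict String String) (q : Int × String) : PySem.Dict String String :=
  let d := pvToDict lex
  let words := d.keys
  let i := q.1
  let wi := q.2
  let st :=
    (d.getD wi PySem.Dict.empty).keys.foldl
      (fun (st : String × Int × PySem.Dict String String) sense =>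
        let first := if st.1 == "" then sense else st.1
        let inner :=
          (PySem.List.pyRange 0 (PySem.List.len words) 1).foldl
            (fun (st2 : Int × PySem.Dict String String) j =>
              if i == j then st2 else
              let wj := PySem.List.pyGetD words j ""
              (d.getD wj PySem.Dict.empty).keys.foldl
                (fun (st3 : Int × PySem.Dict String String) other =>
                  let ov : Int :=
                    ((PySem.Set.inter
                        (PySem.Set.ofList ((d.getD wi PySem.Dict.empty).getD sense []))
                        ((d.getD wj PySem.Dict.empty).getD other [])).length : Int)
                  if ov > st3.1 then (ov, st3.2.insert wi sense) else st3)
                st2)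
            (st.2.1, st.2.2)
        (first, inner))
      ("", 0, overlaps)
  if !(st.2.2.contains wi) then st.2.2.insert wi st.1 else st.2.2

lemma pvAFold (lex : List (String × List (String × List String))) :
    words_to_synsets lex
    = ((PySem.List.enumerate (pvToDict lex).keys).foldl (pvStepAFun lex) PySem.Dict.empty).values := by
  unfold words_to_synsets pvStepAFun
  dsimp only
  rw [show ((pvToDict lex).size : Int) = PySem.List.len (pvToDict lex).keys from by
        simp [PySem.List.len, PySem.Dict.size, PySem.Dict.keys]]
  rw [PySem.List.enumerate_eq_map_pyRange _ "", List.foldl_map]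

lemma pvInnerConv (lex : List (String × List (String × List String))) (i : Int)
    (wi sense : String) (g : List String) (st : Int × PySem.Dict String String) :
    (PySem.List.pyRange 0 (PySem.List.len (pvToDict lex).keys) 1).foldl
      (fun (st2 : Int × PySem.Dict String String) j =>
        if i == j then st2 else
        ((pvToDict lex).getD (PySem.List.pyGetD (pvToDict lex).keys j "") PySem.Dict.empty).keys.foldl
          (fun (st3 : Int × PySem.Dict String String) other =>
            let ov : Int := pvOv g
              (((pvToDict lex).getD (PySem.List.pyGetD (pvToDict lex).keys j "") PySem.Dict.empty).getD other [])
            if ov > st3.1 then (ov, st3.2.insert wi sense) else st3)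
          st2)
      st
    = (pvStream (pvToDict lex).items i g).foldl
        (fun st3 n => if st3.1 < n then (n, st3.2.insert wi sense) else st3) st := by
  rw [show (PySem.List.pyRange 0 (PySem.List.len (pvToDict lex).keys) 1).foldl
        (fun (st2 : Int × PySem.Dict String String) j =>
          if i == j then st2 else
          ((pvToDict lex).getD (PySem.List.pyGetD (pvToDict lex).keys j "") PySem.Dict.empty).keys.foldl
            (fun (st3 : Int × PySem.Dict String String) other =>
              let ov : Int := pvOv g
                (((pvToDict lex).getD (PySem.List.pyGetD (pvToDict lex).keys j "") PySem.Dict.empty).getD other [])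
              if ov > st3.1 then (ov, st3.2.insert wi sense) else st3)
            st2)
        st
      = (PySem.List.enumerate (pvToDict lex).keys).foldl
        (fun (st2 : Int × PySem.Dict String String) q =>
          if i == q.1 then st2 else
          ((pvToDict lex).getD q.2 PySem.Dict.empty).keys.foldl
            (fun (st3 : Int × PySem.Dict String String) other =>
              let ov : Int := pvOv g (((pvToDict lex).getD q.2 PySem.Dict.empty).getD other [])
              if ov > st3.1 then (ov, st3.2.insert wi sense) else st3)
            st2)
        st from by rw [PySem.List.enumerate_eq_map_pyRange _ "", List.foldl_map]]
  rw [show (pvToDict lex).keys = (pvToDict lex).items.map (·.1) from rfl]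
  rw [pvEnumMap, List.foldl_map]
  rw [PySem.List.foldl_congr_mem _ _
      (fun (st2 : Int × PySem.Dict String String) q =>
        if (!(q.1 == i)) = true then
          ((q.2.2.items.map (fun r => pvOv g r.2)).foldl
            (fun st3 n => if st3.1 < n then (n, st3.2.insert wi sense) else st3) st2)
        else st2) st ?_]
  · rw [PySem.List.foldl_if_eq_foldl_filter, ← List.foldl_flatMap]
    rfl
  · intro st2 q hq
    have hq2 : (q.2.1, q.2.2) ∈ (pvToDict lex).items := by
      obtain ⟨k, hk, hqe⟩ := (PySem.List.mem_enumerate_iff _ _ _).mp hq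
      subst hqe
      exact List.getElem_mem hk
    have hd : (pvToDict lex).getD q.2.1 PySem.Dict.empty = q.2.2 :=
      PySem.Dict.getD_of_mem_items _ hq2 (PySem.Dict.nodup_keys_ofList _) _
    rw [Bool.beq_comm (a := i)]
    cases hb : (q.1 == i) with
    | true => simp [hb]
    | false =>
      simp only [hb, Bool.not_false, if_true]
      rw [hd]
      rw [PySem.Dict.items_eq_map_keys q.2.2 ?hnd ([] : List String), List.foldl_map, List.foldl_map]
      case hnd => exact pvValKeysNodup lex (List.mem_map_of_mem hq2)
      rfl

lemma pvStepAChar (lex : List (String × List (String × List String)))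
    (acc : PySem.Dict String String) (q : Int × String) (hacc : acc.contains q.2 = false) :
    pvStepAFun lex acc q
    = acc.insert q.2 (pvChoice (pvToDict lex).items q.1 ((pvToDict lex).getD q.2 PySem.Dict.empty)) := by
  unfold pvStepAFun
  dsimp only
  rw [show ((pvToDict lex).getD q.2 PySem.Dict.empty).keys
        = ((pvToDict lex).getD q.2 PySem.Dict.empty).items.map (fun p => p.1) from rfl,
      List.foldl_map]
  rw [PySem.List.foldl_congr_mem _ _
      (fun (st : String × Int × PySem.Dict String String) (p : String × List String) =>
        (if st.1 == "" then p.1 else st.1,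
         (pvStream (pvToDict lex).items q.1 p.2).foldl
           (fun st3 n => if st3.1 < n then (n, st3.2.insert q.2 p.1) else st3)
           (st.2.1, st.2.2)))
      ("", 0, acc) ?_]
  · have hL2 := pvL2 (fun p : String × List String => p.1)
      (fun p : String × List String => pvStream (pvToDict lex).items q.1 p.2)
      q.2 acc ((pvToDict lex).getD q.2 PySem.Dict.empty).items "" 0 none le_rfl
    simp only [pvApply] at hL2
    rw [hL2]
    rw [show ((pvToDict lex).getD q.2 PySem.Dict.empty).items.map
          (fun a => (a.1, (pvStream (pvToDict lex).items q.1 a.2).foldl max 0))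
        = pvScored (pvToDict lex).items q.1 ((pvToDict lex).getD q.2 PySem.Dict.empty) from rfl]
    cases hsel : pvSel 0 none (pvScored (pvToDict lex).items q.1 ((pvToDict lex).getD q.2 PySem.Dict.empty)) with
    | none =>
      simp only [hacc, Bool.not_false, if_true]
      unfold pvChoice pvAchoice
      rw [hsel]
      simp only [pvScored, List.foldl_map]
    | some s =>
      simp only [PySem.Dict.contains_insert_self, Bool.not_true, Bool.false_eq_true, if_false]
      unfold pvChoice pvAchoice
      rw [hsel]
  · intro st p hp
    have hg : ((pvToDict lex).getD q.2 PySem.Dict.empty).getD p.1 [] = p.2 :=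
      PySem.Dict.getD_of_mem_items _ (by simpa using hp) (pvGetDKeysNodup lex q.2) _
    rw [hg]
    exact congrArg _ (pvInnerConv lex q.1 q.2 p.1 p.2 (st.2.1, st.2.2))

lemma pvPropA (lex : List (String × List (String × List String))) :
    words_to_synsets lex
    = (PySem.List.enumerate (pvToDict lex).items).map
        (fun q => pvChoice (pvToDict lex).items q.1 q.2.2) := by
  rw [pvAFold]
  rw [show ((PySem.List.enumerate (pvToDict lex).keys).foldl (pvStepAFun lex) PySem.Dict.empty).values
      = ((PySem.List.enumerate (pvToDict lex).keys).foldl (pvStepAFun lex) PySem.Dict.empty).items.map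
          (fun p => p.2) from rfl]
  rw [pvOuter (pvStepAFun lex)
      (fun q => pvChoice (pvToDict lex).items q.1 ((pvToDict lex).getD q.2 PySem.Dict.empty))
      (pvStepAChar lex) (PySem.List.enumerate (pvToDict lex).keys) PySem.Dict.empty
      (by rw [show (PySem.List.enumerate (pvToDict lex).keys).map (fun x => x.2)
                = (pvToDict lex).keys from PySem.List.map_snd_enumerate _ _]
          exact PySem.Dict.nodup_keys_ofList _)
      (fun q' _ => PySem.Dict.contains_empty _)]
  rw [show (pvToDict lex).keys = (pvToDict lex).items.map (fun p => p.1) from rfl, pvEnumMap]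
  simp only [List.map_map, PySem.Dict.empty, List.nil_append]
  apply List.map_congr_left
  intro q hq
  have hq2 : (q.2.1, q.2.2) ∈ (pvToDict lex).items := by
    obtain ⟨k, hk, hqe⟩ := (PySem.List.mem_enumerate_iff _ _ _).mp hq
    subst hqe
    exact List.getElem_mem hk
  simp only [Function.comp]
  rw [PySem.Dict.getD_of_mem_items _ hq2 (PySem.Dict.nodup_keys_ofList _) _]

-- ===== B-side machinery: the inverted index, pair counter and per-sense maxima =====

-- the flattened posting stream: (token, (word index, sense key)) in B's traversal order
def pvFlatPost (its : List (String × PySem.Dict String (List String))) :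
    List (String × (Int × String)) :=
  (PySem.List.enumerate its).flatMap (fun q =>
    q.2.2.items.flatMap (fun sg =>
      (PySem.List.dedup sg.2).map (fun t => (t, (q.1, sg.1)))))

def pvOcc (its : List (String × PySem.Dict String (List String))) (t : String) :
    List (Int × String) :=
  ((pvFlatPost its).filter (fun p => p.1 == t)).map (·.2)

def pvToks (its : List (String × PySem.Dict String (List String))) : List String :=
  PySem.Set.ofList ((pvFlatPost its).map (·.1))

def pvPairList (its : List (String × PySem.Dict String (List String))) :
    List ((Int × String) × (Int × String)) :=
  (pvToks its).flatMap (fun t =>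
    (pvOcc its t).flatMap (fun a =>
      ((pvOcc its t).filter (fun b => !(a.1 == b.1))).map (fun b => (a, b))))

def pvPostingsD (its : List (String × PySem.Dict String (List String))) :
    PySem.Dict String (List (Int × String)) :=
  (pvFlatPost its).foldl (fun d p => d.modify p.1 [] (· ++ [p.2])) PySem.Dict.empty

def pvBestD (its : List (String × PySem.Dict String (List String))) :
    PySem.Dict (Int × String) Int :=
  (PySem.Dict.counter (pvPairList its)).items.foldl
    (fun best pc => if best.getD pc.1.1 0 < pc.2 then best.insert pc.1.1 pc.2 else best)
    PySem.Dict.empty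

lemma pvPostGetD (its : List (String × PySem.Dict String (List String))) (t : String) :
    (pvPostingsD its).getD t [] = pvOcc its t := by
  unfold pvPostingsD pvOcc
  rw [PySem.Dict.getD_foldl_modify_append]
  rfl

lemma pvPostKeys (its : List (String × PySem.Dict String (List String))) :
    (pvPostingsD its).keys = pvToks its := by
  unfold pvPostingsD pvToks
  rw [show (fun (d : PySem.Dict String (List (Int × String))) (p : String × (Int × String)) =>
        d.modify p.1 [] (· ++ [p.2]))
      = (fun d p => d.modify ((fun (p : String × (Int × String)) => p.1) p) []
          ((fun (d : PySem.Dict String (List (Int × String))) (p : String × (Int × String))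
            (v : List (Int × String)) => v ++ [p.2]) d p)) from rfl]
  rw [PySem.Dict.keys_foldl_modify_key]
  rw [show (PySem.Dict.empty : PySem.Dict String (List (Int × String))).keys = [] from rfl]
  rw [PySem.Set.update_nil_left]

lemma pvPostKeysNodup (its : List (String × PySem.Dict String (List String))) :
    (pvPostingsD its).keys.Nodup := by
  unfold pvPostingsD
  rw [show (fun (d : PySem.Dict String (List (Int × String))) (p : String × (Int × String)) =>
        d.modify p.1 [] (· ++ [p.2]))
      = (fun d p => d.modify ((fun (p : String × (Int × String)) => p.1) p) []
          ((fun (d : PySem.Dict String (List (Int × String))) (p : String × (Int × String))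
            (v : List (Int × String)) => v ++ [p.2]) d p)) from rfl]
  exact PySem.Dict.nodup_keys_foldl_modify_key _ _ _ _ _ (by simp [PySem.Dict.empty])

lemma pvPostValues (its : List (String × PySem.Dict String (List String))) :
    (pvPostingsD its).values = (pvToks its).map (pvOcc its) := by
  rw [PySem.Dict.values_eq_map_keys _ (pvPostKeysNodup its) [], pvPostKeys its]
  exact List.map_congr_left (fun t _ => pvPostGetD its t)

-- nodup of a flatMap whose branches are tagged by a key that is nodup across branches
lemma pvNodupFlatMap {α β γ : Type} (l : List α) (f : α → List β) (tag : β → γ) (kf : α → γ)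
    (h1 : ∀ x ∈ l, (f x).Nodup) (h2 : ∀ x ∈ l, ∀ y ∈ f x, tag y = kf x)
    (h3 : (l.map kf).Nodup) : (l.flatMap f).Nodup := by
  induction l with
  | nil => simp
  | cons x t ih =>
    simp only [List.flatMap_cons]
    simp only [List.map_cons, List.nodup_cons] at h3
    apply List.Nodup.append (h1 x (by simp)) (ih (fun x hx => h1 x (by simp [hx]))
      (fun x hx => h2 x (by simp [hx])) h3.2)
    intro y hy hy2
    obtain ⟨x', hx', hyx'⟩ := List.mem_flatMap.mp hy2
    have e1 : tag y = kf x := h2 x (by simp) y hy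
    have e2 : tag y = kf x' := h2 x' (by simp [hx']) y hyx'
    exact h3.1 (e1 ▸ e2 ▸ List.mem_map_of_mem hx')

lemma pvFlatPostNodup (its : List (String × PySem.Dict String (List String)))
    (hv : ∀ v ∈ its.map (·.2), v.keys.Nodup) : (pvFlatPost its).Nodup := by
  unfold pvFlatPost
  apply pvNodupFlatMap _ _ (fun y => y.2.1) (fun q => q.1)
  · intro q hq
    have hq2 : q.2.2 ∈ its.map (·.2) := by
      obtain ⟨k, hk, hqe⟩ := (PySem.List.mem_enumerate_iff _ _ _).mp hq
      subst hqe
      exact List.mem_map_of_mem (List.getElem_mem hk)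
    apply pvNodupFlatMap _ _ (fun y => y.2.2) (fun sg => sg.1)
    · intro sg _
      exact (PySem.List.nodup_dedup _).map (fun a b he => by
        simpa using congrArg Prod.fst he)
    · intro sg _ y hy
      obtain ⟨t, _, he⟩ := List.mem_map.mp hy
      rw [← he]
    · exact hv _ hq2
  · intro q _ y hy
    obtain ⟨sg, _, hy2⟩ := List.mem_flatMap.mp hy
    obtain ⟨t, _, he⟩ := List.mem_map.mp hy2
    rw [← he]
  · have h := PySem.List.pairwise_lt_enumerate its 0
    exact List.Pairwise.map _ (fun a b hab => ne_of_lt hab) h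

lemma pvOccNodup (its : List (String × PySem.Dict String (List String)))
    (hv : ∀ v ∈ its.map (·.2), v.keys.Nodup) (t : String) : (pvOcc its t).Nodup := by
  unfold pvOcc
  apply List.Nodup.map_on _ ((pvFlatPostNodup its hv).filter _)
  intro x hx y hy hxy
  have hx1 : x.1 = t := by simpa using (List.mem_filter.mp hx).2
  have hy1 : y.1 = t := by simpa using (List.mem_filter.mp hy).2
  exact Prod.ext (hx1.trans hy1.symm) hxy

lemma pvMemOcc (its : List (String × PySem.Dict String (List String)))
    (t : String) (a : Int × String) : a ∈ pvOcc its t ↔ (t, a) ∈ pvFlatPost its := by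
  unfold pvOcc
  simp only [List.mem_map, List.mem_filter, beq_iff_eq]
  constructor
  · rintro ⟨p, ⟨hp, hp1⟩, hp2⟩
    have : p = (t, a) := Prod.ext hp1 hp2
    exact this ▸ hp
  · intro h
    exact ⟨(t, a), ⟨h, rfl⟩, rfl⟩

lemma pvTokMem (its : List (String × PySem.Dict String (List String))) (t : String) :
    t ∈ pvToks its ↔ ∃ a, (t, a) ∈ pvFlatPost its := by
  unfold pvToks
  rw [PySem.Set.mem_ofList]
  simp only [List.mem_map]
  constructor
  · rintro ⟨p, hp, hp1⟩
    exact ⟨p.2, by rwa [show (t, p.2) = p from Prod.ext hp1.symm rfl]⟩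
  · rintro ⟨a, ha⟩
    exact ⟨(t, a), ha, rfl⟩

lemma pvSenseMem (its : List (String × PySem.Dict String (List String)))
    (hv : ∀ v ∈ its.map (·.2), v.keys.Nodup)
    (q : Int × String × PySem.Dict String (List String)) (hq : q ∈ PySem.List.enumerate its)
    (s : String) (g : List String) (hsg : (s, g) ∈ q.2.2.items) (t : String) :
    (t, (q.1, s)) ∈ pvFlatPost its ↔ t ∈ g := by
  unfold pvFlatPost
  simp only [List.mem_flatMap, List.mem_map]
  constructor
  · rintro ⟨q', hq', sg', hsg', t', ht', heq⟩
    have ht : t' = t := congrArg Prod.fst heq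
    have hqi : q'.1 = q.1 := congrArg (fun p => p.2.1) heq
    have hsi : sg'.1 = s := congrArg (fun p => p.2.2) heq
    have hq'q : q' = q := by
      obtain ⟨k, hk, he⟩ := (PySem.List.mem_enumerate_iff _ _ _).mp hq
      obtain ⟨k', hk', he'⟩ := (PySem.List.mem_enumerate_iff _ _ _).mp hq'
      have hkk : k' = k := by
        have h2 := hqi
        rw [he, he'] at h2
        simp only at h2
        omega
      subst hkk
      rw [he, he']
    rw [hq'q] at hsg'
    have hkeys : (q.2.2.items.map (·.1)).Nodup := by
      have hq2 : q.2.2 ∈ its.map (·.2) := by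
        obtain ⟨k, hk, he⟩ := (PySem.List.mem_enumerate_iff _ _ _).mp hq
        rw [he]
        exact List.mem_map_of_mem (List.getElem_mem hk)
      exact hv _ hq2
    have : sg' = (s, g) := List.inj_on_of_nodup_map hkeys hsg' hsg (by simpa using hsi)
    rw [← ht]
    rw [this] at ht'
    exact (PySem.List.mem_dedup _ _).mp ht'
  · intro ht
    exact ⟨q, hq, (s, g), hsg, t, (PySem.List.mem_dedup _ _).mpr ht, rfl⟩

lemma pvCountFlatMap {α β : Type} [BEq β] [LawfulBEq β] (l : List α) (f : α → List β) (v : β) :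
    (l.flatMap f).count v = (l.map (fun x => (f x).count v)).sum := by
  induction l with
  | nil => rfl
  | cons x t ih => simp [List.count_append, ih]

lemma pvCountMapPair {γ δ : Type} [BEq γ] [LawfulBEq γ] [BEq δ] [LawfulBEq δ] [DecidableEq γ]
    (L : List δ) (x a : γ) (b : δ) :
    ((L.map (fun y => (x, y))).count (a, b)) = if x = a then L.count b else 0 := by
  induction L with
  | nil => simp
  | cons y t ih =>
    simp only [List.map_cons, List.count_cons, ih]
    by_cases hx : x = a
    · subst hx
      by_cases hy : y = b
      · subst hy; simp
      · simp [hy, Prod.ext_iff]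
    · simp [hx, Prod.ext_iff]

lemma pvSumIte {α : Type} [DecidableEq α] [BEq α] [LawfulBEq α] (l : List α) (a : α) (c : Nat) :
    (l.map (fun x => if x = a then c else 0)).sum = l.count a * c := by
  induction l with
  | nil => simp
  | cons x t ih =>
    simp only [List.map_cons, List.sum_cons, ih, List.count_cons]
    by_cases hx : x = a
    · subst hx; simp [Nat.add_mul, Nat.add_comm]
    · simp [hx]

lemma pvNodupCount {α : Type} [BEq α] [LawfulBEq α] [DecidableEq α] (l : List α)
    (h : l.Nodup) (a : α) : l.count a = if a ∈ l then 1 else 0 := by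
  by_cases ha : a ∈ l
  · rw [if_pos ha]
    exact List.count_eq_one_of_mem h ha
  · rw [if_neg ha]
    exact List.count_eq_zero_of_not_mem ha

lemma pvSumIndicator {α : Type} (l : List α) (p : α → Bool) :
    (l.map (fun x => if p x then 1 else 0)).sum = l.countP p := by
  induction l with
  | nil => rfl
  | cons x t ih =>
    simp only [List.map_cons, List.sum_cons, ih, List.countP_cons]
    by_cases hx : p x <;> simp [hx, Nat.add_comm]

lemma pvCountPairList (its : List (String × PySem.Dict String (List String)))
    (hv : ∀ v ∈ its.map (·.2), v.keys.Nodup)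
    (a b : Int × String) (hab : (a.1 == b.1) = false) :
    (pvPairList its).count (a, b)
    = (pvToks its).countP (fun t => decide (a ∈ pvOcc its t) && decide (b ∈ pvOcc its t)) := by
  unfold pvPairList
  rw [pvCountFlatMap]
  rw [List.map_congr_left
      (g := fun t => if (decide (a ∈ pvOcc its t) && decide (b ∈ pvOcc its t)) = true then 1 else 0)
      (fun t _ => ?_)]
  · exact pvSumIndicator _ _
  · dsimp only
    rw [pvCountFlatMap]
    rw [List.map_congr_left
        (g := fun x => if x = a then (pvOcc its t).count b else 0) (fun x _ => ?_)]
    · rw [pvSumIte, pvNodupCount _ (pvOccNodup its hv t) a, pvNodupCount _ (pvOccNodup its hv t) b]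
      by_cases h1 : a ∈ pvOcc its t <;> by_cases h2 : b ∈ pvOcc its t <;> simp [h1, h2]
    · dsimp only
      rw [pvCountMapPair]
      by_cases hx : x = a
      · subst hx
        rw [if_pos rfl, if_pos rfl, List.count_filter (by simp [hab])]
      · rw [if_neg hx, if_neg hx]

lemma pvCountPTrans {α : Type} [DecidableEq α] (l1 l2 : List α) (p q : α → Bool)
    (h1 : l1.Nodup) (h2 : l2.Nodup)
    (h : ∀ x, (x ∈ l1 ∧ p x = true) ↔ (x ∈ l2 ∧ q x = true)) : l1.countP p = l2.countP q := by
  rw [List.countP_eq_length_filter, List.countP_eq_length_filter]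
  rw [← List.toFinset_card_of_nodup (h1.filter p), ← List.toFinset_card_of_nodup (h2.filter q)]
  congr 1
  apply Finset.ext
  intro x
  simp only [List.mem_toFinset, List.mem_filter]
  exact h x

lemma pvCountOv (its : List (String × PySem.Dict String (List String)))
    (hv : ∀ v ∈ its.map (·.2), v.keys.Nodup)
    (q : Int × String × PySem.Dict String (List String)) (hq : q ∈ PySem.List.enumerate its)
    (s : String) (g : List String) (hsg : (s, g) ∈ q.2.2.items)
    (q' : Int × String × PySem.Dict String (List String)) (hq' : q' ∈ PySem.List.enumerate its)
    (o : String) (g' : List String) (hsg' : (o, g') ∈ q'.2.2.items)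
    (hab : (q.1 == q'.1) = false) :
    (pvPairList its).count ((q.1, s), (q'.1, o))
    = (PySem.Set.inter (PySem.Set.ofList g) g').length := by
  rw [pvCountPairList its hv _ _ (by simpa using hab)]
  rw [show PySem.Set.inter (PySem.Set.ofList g) g'
      = (PySem.Set.ofList g).filter (fun x => g'.contains x) from rfl]
  rw [← List.countP_eq_length_filter]
  apply pvCountPTrans _ _ _ _
    (PySem.Set.nodup_ofList _) (PySem.Set.nodup_ofList _)
  intro x
  simp only [Bool.and_eq_true, decide_eq_true_eq]
  constructor
  · rintro ⟨-, hax, hbx⟩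
    have h1 : x ∈ g := (pvSenseMem its hv q hq s g hsg x).mp ((pvMemOcc its x _).mp hax)
    have h2 : x ∈ g' := (pvSenseMem its hv q' hq' o g' hsg' x).mp ((pvMemOcc its x _).mp hbx)
    exact ⟨(PySem.Set.mem_ofList g x).mpr h1, by simpa [List.contains_iff_mem] using h2⟩
  · rintro ⟨hxg, hxg'⟩
    have h1 : x ∈ g := (PySem.Set.mem_ofList g x).mp hxg
    have h2 : x ∈ g' := by simpa [List.contains_iff_mem] using hxg'
    have ha : (x, (q.1, s)) ∈ pvFlatPost its := (pvSenseMem its hv q hq s g hsg x).mpr h1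
    have hb : (x, (q'.1, o)) ∈ pvFlatPost its := (pvSenseMem its hv q' hq' o g' hsg' x).mpr h2
    exact ⟨(pvTokMem its x).mpr ⟨_, ha⟩, (pvMemOcc its x _).mpr ha, (pvMemOcc its x _).mpr hb⟩

-- the best-dict loop: running strict max per key
lemma pvBestGetD : ∀ (l : List (((Int × String) × (Int × String)) × Int))
    (d : PySem.Dict (Int × String) Int) (a : Int × String),
    (l.foldl (fun best pc => if best.getD pc.1.1 0 < pc.2 then best.insert pc.1.1 pc.2 else best) d).getD a 0
    = ((l.filter (fun pc => pc.1.1 == a)).map (·.2)).foldl max (d.getD a 0) := by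
  intro l
  induction l with
  | nil => intro d a; rfl
  | cons x t ih =>
    intro d a
    simp only [List.foldl_cons, List.filter_cons]
    by_cases hk : x.1.1 = a
    · subst hk
      simp only [beq_self_eq_true, if_true, List.map_cons, List.foldl_cons]
      by_cases h : d.getD x.1.1 0 < x.2
      · rw [if_pos h, ih]
        rw [PySem.Dict.getD_insert_self]
        congr 1
        omega
      · rw [if_neg h, ih]
        congr 1
        omega
    · have hk' : (x.1.1 == a) = false := by simpa using hk
      rw [hk']
      simp only [Bool.false_eq_true, if_false]
      by_cases h : d.getD x.1.1 0 < x.2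
      · rw [if_pos h, ih, PySem.Dict.getD_insert_of_ne d x.2 0 (fun he => hk he.symm)]
      · rw [if_neg h, ih]

lemma pvMaxEq (l1 l2 : List Int) (h1 : ∀ x ∈ l1, x ≤ l2.foldl max 0)
    (h2 : ∀ x ∈ l2, x ≤ l1.foldl max 0) : l1.foldl max 0 = l2.foldl max 0 := by
  apply le_antisymm
  · rcases PySem.List.foldl_max_mem l1 0 with h | h
    · rw [h]; exact (PySem.List.le_foldl_max l2 0).1
    · exact h1 _ h
  · rcases PySem.List.foldl_max_mem l2 0 with h | h
    · rw [h]; exact (PySem.List.le_foldl_max l1 0).1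
    · exact h2 _ h

lemma pvScoreEq (lex : List (String × List (String × List String)))
    (q : Int × String × PySem.Dict String (List String))
    (hq : q ∈ PySem.List.enumerate (pvToDict lex).items)
    (s : String) (g : List String) (hsg : (s, g) ∈ q.2.2.items) :
    (pvBestD (pvToDict lex).items).getD (q.1, s) 0
    = (pvStream (pvToDict lex).items q.1 g).foldl max 0 := by
  have hv : ∀ v ∈ (pvToDict lex).items.map (·.2), v.keys.Nodup := fun v hvm =>
    pvValKeysNodup lex hvm
  set its := (pvToDict lex).items with hits
  unfold pvBestD
  rw [pvBestGetD]
  rw [show (PySem.Dict.empty : PySem.Dict (Int × String) Int).getD (q.1, s) 0 = 0 from rfl]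
  rw [PySem.Dict.items_counter]
  rw [List.filter_map, List.map_map]
  simp only [Function.comp_def]
  apply pvMaxEq
  · -- every stored pair count is the overlap of a genuine sense pair of another word
    intro x hx
    simp only [List.mem_map, List.mem_filter] at hx
    obtain ⟨k, ⟨hkmem, hk1⟩, hkval⟩ := hx
    have hk1' : k.1 = (q.1, s) := by simpa using hk1
    have hkmem' : k ∈ pvPairList its := (PySem.Set.mem_ofList _ _).mp hkmem
    simp only [pvPairList, List.mem_flatMap, List.mem_map, List.mem_filter] at hkmem'
    obtain ⟨t, -, a', ha', b, ⟨hb, hbne⟩, hke⟩ := hkmem'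
    have ha'1 : a' = (q.1, s) := by rw [← hke] at hk1'; exact hk1'
    subst ha'1
    have hbflat : (t, b) ∈ pvFlatPost its := (pvMemOcc its t b).mp hb
    simp only [pvFlatPost, List.mem_flatMap, List.mem_map] at hbflat
    obtain ⟨q', hq', sg', hsg', t', -, he⟩ := hbflat
    have hbq : b = (q'.1, sg'.1) := (congrArg Prod.snd he).symm
    have hne : (q.1 == q'.1) = false := by
      rw [hbq] at hbne
      simpa using hbne
    have hcount : (pvPairList its).count ((q.1, s), (q'.1, sg'.1))
        = (PySem.Set.inter (PySem.Set.ofList g) sg'.2).length :=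
      pvCountOv its hv q hq s g hsg q' hq' sg'.1 sg'.2 (by simpa using hsg') hne
    have hxval : x = pvOv g sg'.2 := by
      rw [← hkval, ← hke, hbq, hcount]
      rfl
    have hmem : pvOv g sg'.2 ∈ pvStream its q.1 g := by
      simp only [pvStream, List.mem_flatMap, List.mem_filter, List.mem_map]
      refine ⟨q', ⟨hq', ?_⟩, sg', hsg', rfl⟩
      simpa [Bool.beq_comm] using hne
    rw [hxval]
    exact (PySem.List.le_foldl_max _ 0).2 _ hmem
  · -- every stream overlap is bounded by some stored pair count (or is ≤ 0)
    intro y hy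
    simp only [pvStream, List.mem_flatMap, List.mem_filter, List.mem_map] at hy
    obtain ⟨q', ⟨hq', hne⟩, r, hr, hyval⟩ := hy
    have hne' : (q.1 == q'.1) = false := by simpa [Bool.beq_comm] using hne
    have hcount : (pvPairList its).count ((q.1, s), (q'.1, r.1))
        = (PySem.Set.inter (PySem.Set.ofList g) r.2).length :=
      pvCountOv its hv q hq s g hsg q' hq' r.1 r.2 (by simpa using hr) hne'
    have hyc : y = ((pvPairList its).count ((q.1, s), (q'.1, r.1)) : Int) := by
      rw [hcount, ← hyval]
      rfl
    by_cases hz : (pvPairList its).count ((q.1, s), (q'.1, r.1)) = 0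
    · rw [hyc, hz]
      have := (PySem.List.le_foldl_max
        ((List.filter (fun x => x.1 == (q.1, s)) (PySem.Set.ofList (pvPairList its))).map
          (fun x => ((List.count x (pvPairList its) : Int)))) 0).1
      simpa using this
    · have hmem : ((q.1, s), (q'.1, r.1)) ∈ pvPairList its :=
        List.count_pos_iff.mp (Nat.pos_of_ne_zero hz)
      have hmem2 : ((pvPairList its).count ((q.1, s), (q'.1, r.1)) : Int)
          ∈ (List.filter (fun x => x.1 == (q.1, s)) (PySem.Set.ofList (pvPairList its))).map
            (fun x => ((List.count x (pvPairList its) : Int))) := by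
        simp only [List.mem_map, List.mem_filter]
        exact ⟨((q.1, s), (q'.1, r.1)), ⟨(PySem.Set.mem_ofList _ _).mpr hmem, by simp⟩, rfl⟩
      rw [hyc]
      exact (PySem.List.le_foldl_max _ 0).2 _ hmem2

-- the port's postings loop is the flat posting-stream fold
lemma pvPostEq (lex : List (String × List (String × List String))) :
    (PySem.List.enumerate (pvToDict lex).keys).foldl
      (fun (postings : PySem.Dict String (List (Int × String))) iw =>
        (((pvToDict lex).getD iw.2 PySem.Dict.empty).items).foldl (fun postings sg =>
          (PySem.List.dedup sg.2).foldl (fun postings t =>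
            postings.modify t [] (· ++ [(iw.1, sg.1)])) postings)
          postings)
      PySem.Dict.empty
    = pvPostingsD (pvToDict lex).items := by
  rw [show (pvToDict lex).keys = (pvToDict lex).items.map (·.1) from rfl, pvEnumMap, List.foldl_map]
  rw [PySem.List.foldl_congr_mem _ _
      (fun (postings : PySem.Dict String (List (Int × String)))
           (q : Int × String × PySem.Dict String (List String)) =>
        q.2.2.items.foldl (fun postings sg =>
          (PySem.List.dedup sg.2).foldl (fun postings t =>
            postings.modify t [] (· ++ [(q.1, sg.1)])) postings)
          postings)
      PySem.Dict.empty ?_]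
  · unfold pvPostingsD pvFlatPost
    rw [List.foldl_flatMap]
    apply PySem.List.foldl_congr_mem
    intro acc q _
    rw [List.foldl_flatMap]
    apply PySem.List.foldl_congr_mem
    intro acc2 sg _
    rw [List.foldl_map]
  · intro acc q hq
    have hq2 : (q.2.1, q.2.2) ∈ (pvToDict lex).items := by
      obtain ⟨k, hk, hqe⟩ := (PySem.List.mem_enumerate_iff _ _ _).mp hq
      subst hqe
      exact List.getElem_mem hk
    rw [PySem.Dict.getD_of_mem_items _ hq2 (PySem.Dict.nodup_keys_ofList _) _]

-- the port's pair loop is the pair-stream counter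
lemma pvPairEq (its : List (String × PySem.Dict String (List String))) :
    (pvPostingsD its).values.foldl
      (fun (pair : PySem.Dict ((Int × String) × (Int × String)) Int) occ =>
        occ.foldl (fun pair a =>
          occ.foldl (fun pair b =>
            if !(a.1 == b.1) then pair.insert (a, b) (pair.getD (a, b) 0 + 1) else pair)
            pair)
          pair)
      PySem.Dict.empty
    = PySem.Dict.counter (pvPairList its) := by
  rw [pvPostValues, List.foldl_map]
  rw [← PySem.Dict.foldl_insert_getD_add_one_eq_counter]
  unfold pvPairList
  rw [List.foldl_flatMap]
  apply PySem.List.foldl_congr_mem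
  intro acc t _
  rw [List.foldl_flatMap]
  apply PySem.List.foldl_congr_mem
  intro acc2 a _
  rw [List.foldl_map, ← PySem.List.foldl_if_eq_foldl_filter]

lemma pvPropB (lex : List (String × List (String × List String))) :
    words_to_synsets_alt lex
    = (PySem.List.enumerate (pvToDict lex).items).map
        (fun q => pvBsel (pvScored (pvToDict lex).items q.1 q.2.2)) := by
  unfold words_to_synsets_alt
  dsimp only
  rw [pvPostEq lex, pvPairEq (pvToDict lex).items]
  rw [show (PySem.Dict.counter (pvPairList (pvToDict lex).items)).items.foldl
        (fun (best : PySem.Dict (Int × String) Int) pc =>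
          if best.getD pc.1.1 0 < pc.2 then best.insert pc.1.1 pc.2 else best)
        PySem.Dict.empty
      = pvBestD (pvToDict lex).items from rfl]
  rw [PySem.List.foldl_append_singleton_eq_map, List.nil_append]
  rw [show (pvToDict lex).keys = (pvToDict lex).items.map (·.1) from rfl, pvEnumMap, List.map_map]
  apply List.map_congr_left
  intro q hq
  have hq2 : (q.2.1, q.2.2) ∈ (pvToDict lex).items := by
    obtain ⟨k, hk, hqe⟩ := (PySem.List.mem_enumerate_iff _ _ _).mp hq
    subst hqe
    exact List.getElem_mem hk
  simp only [Function.comp]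
  rw [PySem.Dict.getD_of_mem_items _ hq2 (PySem.Dict.nodup_keys_ofList _) _]
  set its := (pvToDict lex).items with hits
  -- the per-word score list equals the scored-sense projections
  have hscores : q.2.2.keys.map (fun s => (pvBestD its).getD (q.1, s) 0)
      = (pvScored its q.1 q.2.2).map (·.2) := by
    rw [show q.2.2.keys = q.2.2.items.map (·.1) from rfl, List.map_map]
    unfold pvScored
    rw [List.map_map]
    apply List.map_congr_left
    intro p hp
    simp only [Function.comp]
    exact pvScoreEq lex q hq p.1 p.2 (by simpa using hp)
  have hnames : q.2.2.keys = (pvScored its q.1 q.2.2).map (·.1) := by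
    unfold pvScored
    rw [List.map_map]
    rfl
  have hempty : q.2.2.keys.isEmpty = (pvScored its q.1 q.2.2).isEmpty := by
    rw [hnames, List.isEmpty_map]
  unfold pvBsel
  rw [← hscores, ← hnames, ← hempty]
  cases he : q.2.2.keys.isEmpty with
  | true => simp
  | false =>
    simp only [Bool.false_eq_true, if_false]
    cases hmx : PySem.List.max? (q.2.2.keys.map (fun s => (pvBestD its).getD (q.1, s) 0)) (fun x => x) with
    | none => rfl
    | some m =>
      simp only [Option.bind_some]
      cases hidx : PySem.List.index? (q.2.2.keys.map (fun s => (pvBestD its).getD (q.1, s) 0)) m with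
      | none => rfl
      | some k => simp

lemma pvMain (lex : List (String × List (String × List String)))
    (hD : ¬ D_words_to_synsets lex) :
    words_to_synsets lex = words_to_synsets_alt lex := by
  rw [pvPropA, pvPropB]
  apply List.map_congr_left
  intro q hq
  unfold pvChoice
  apply pvL3
  · intro p hp
    simp only [pvScored, List.mem_map] at hp
    obtain ⟨p0, _, hp0⟩ := hp
    rw [← hp0]
    exact (PySem.List.le_foldl_max _ _).1
  · rintro ⟨hhead, hlen, hM0⟩
    apply hD
    obtain ⟨i0, hi0, hqe⟩ := (PySem.List.mem_enumerate_iff _ _ _).mp hq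
    refine ⟨q.2, by rw [hqe]; exact List.getElem_mem hi0, ?_, ?_, ?_⟩
    · rw [show q.2.2.keys = (pvScored (pvToDict lex).items q.1 q.2.2).map (fun x => x.1) from by
            unfold pvScored; rw [List.map_map]; rfl]
      exact hhead
    · rw [show q.2.2.size = ((pvScored (pvToDict lex).items q.1 q.2.2)).length from by
            unfold pvScored; rw [List.length_map]; rfl]
      exact hlen
    · intro g hg q' hq' hne t ht g2 hg2
      obtain ⟨p0, hp0, hp0g⟩ := List.mem_map.mp hg
      have hsc0 : (pvStream (pvToDict lex).items q.1 p0.2).foldl max 0 = 0 := by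
        have hmem : (pvStream (pvToDict lex).items q.1 p0.2).foldl max 0
            ∈ (pvScored (pvToDict lex).items q.1 q.2.2).map (fun x => x.2) := by
          simp only [pvScored, List.map_map, List.mem_map]
          exact ⟨p0, hp0, rfl⟩
        have hle := (PySem.List.le_foldl_max
          ((pvScored (pvToDict lex).items q.1 q.2.2).map (fun x => x.2)) 0).2 _ hmem
        rw [hM0] at hle
        have hge := (PySem.List.le_foldl_max (pvStream (pvToDict lex).items q.1 p0.2) 0).1
        omega
      obtain ⟨k, hk, hkq⟩ := List.getElem_of_mem hq'
      have hq1 : q.1 = ((0 : Int) + (i0 : Int)) := by rw [hqe]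
      have hq2' : q.2 = (pvToDict lex).items[i0] := by rw [hqe]
      have hkne : (k : Int) ≠ q.1 := by
        intro hkq1
        rw [hq1] at hkq1
        have hik : i0 = k := by omega
        subst hik
        apply hne
        rw [hq2', hkq]
      obtain ⟨r, hr, hrg⟩ := List.mem_map.mp hg2
      have hovmem : pvOv p0.2 r.2 ∈ pvStream (pvToDict lex).items q.1 p0.2 := by
        simp only [pvStream, List.mem_flatMap, List.mem_filter, List.mem_map]
        refine ⟨((k : Int), q'), ⟨?_, ?_⟩, ⟨r, hr, rfl⟩⟩
        · exact (PySem.List.mem_enumerate_iff _ _ _).mpr ⟨k, hk, by rw [hkq]; norm_num⟩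
        · simp [hkne]
      have hov0 : pvOv p0.2 r.2 = 0 := by
        have hle := (PySem.List.le_foldl_max (pvStream (pvToDict lex).items q.1 p0.2) 0).2 _ hovmem
        have := pvOvNonneg p0.2 r.2
        omega
      subst hp0g
      subst hrg
      exact (pvOvZero p0.2 r.2).mp hov0 t ht

-- ===== VERDICT (by name: the statement is the Claim_ definition above) =====
theorem words_to_synsets_spec : Claim_unchanged_words_to_synsets := by
  intro lex _hdom
  unfold Spec_words_to_synsets
  intro hD
  exact pvMain lex hD

theorem words_to_synsets_changed : Claim_changed_words_to_synsets := by
  unfold Claim_changed_words_to_synsets; decide
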